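-- pv_equiv track=rewrite | github.com/r-jelly/program-solving | baekjoon/20914.py | solution
-- ===== SOURCE A (Python) =====
-- from collections import deque
--
-- def find_min_time(keyboard, src, tgt):
--     visited = [[False]*10 for _ in range(3)]
--     visited[src[0]][src[1]] = True
--
--     queue = deque([(src, 0)])
--     while queue:
--         (cur_x, cur_y), time = queue.popleft()
--         if cur_x == tgt[0] and cur_y == tgt[1]:
--             return time
--
--         for dx, dy in [(1, 0), (-1, 0), (0, -1), (0, 1), (-1, 1), (1, -1)]:
--             next_x = cur_x + dx
--             next_y = cur_y + dy
--
--             if next_x<0 or next_x>=3: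
--                 continue
--             if next_y<0 or next_y>=len(keyboard[next_x]):
--                 continue
--             if visited[next_x][next_y]:
--                 continue
--
--             visited[next_x][next_y] = True
--             queue.append(((next_x, next_y), time+2))
--
-- def solution(keyboard, word):
--     time = 0
--     word_point_list = []
--
--     for alp in word:
--         for i in range(len(keyboard)):
--             for j in range(len(keyboard[i])):
--                 if keyboard[i][j] == alp:
--                     word_point_list.append((i, j))
--
--     for i in range(len(word)-1):
--         time += 1
--         time += find_min_time(keyboard, word_point_list[i], word_point_list[i+1])
--     return time+1
-- ===== SOURCE B (Python) =====
-- def _find(keyboard, ch):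
--     for i, row in enumerate(keyboard):
--         for j, cell in enumerate(row):
--             if cell == ch:
--                 return (i, j)
--
--
-- def solution(keyboard, word):
--     total = 1
--     for a, b in zip(word, word[1:]):
--         x0, y0 = _find(keyboard, a)
--         x1, y1 = _find(keyboard, b)
--         dq, dr = x1 - x0, y1 - y0
--         total += 1 + abs(dq) + abs(dr) + abs(dq + dr)
--     return total
-- ===== Notes on version B (the rewrite author's own statement) =====
-- stated objective: simpler
-- what changed: The per-pair BFS over the 3x10 board (visited matrix + frontier queue) is replaced by a first-occurrence position lookup per letter and the closed-form axial hex distance |dq|+|dr|+|dq+dr| per consecutive pair of letters; Pre_ keeps, for words of 2+ letters, only 3-row rectangular keyboards in which each letter of the word occupies exactly one cell, since on ragged boards A's BFS value reflects routing around missing cells and on duplicate-letter boards A's pairing of the collected positions is an accident of its gathering loop.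
-- outside the precondition, e.g. on solution([['a', 'b', 'c'], ['x'], ['d', 'e', 'f']], 'cf'): A returns 12, B returns 6; on solution([['a', 'a'], ['b', 'b'], ['c', 'c']], 'aa'): A returns 4, B returns 2
import Mathlib
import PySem

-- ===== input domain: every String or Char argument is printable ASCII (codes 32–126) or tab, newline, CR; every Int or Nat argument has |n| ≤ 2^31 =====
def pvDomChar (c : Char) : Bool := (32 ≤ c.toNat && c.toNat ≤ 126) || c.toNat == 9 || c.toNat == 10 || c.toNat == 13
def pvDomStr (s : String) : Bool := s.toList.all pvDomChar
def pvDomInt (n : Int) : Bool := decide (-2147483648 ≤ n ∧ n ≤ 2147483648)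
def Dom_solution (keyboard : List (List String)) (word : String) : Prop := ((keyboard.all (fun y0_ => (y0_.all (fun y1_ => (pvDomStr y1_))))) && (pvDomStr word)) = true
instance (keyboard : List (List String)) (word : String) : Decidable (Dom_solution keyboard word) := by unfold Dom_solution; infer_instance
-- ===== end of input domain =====

-- B replaces A's per-pair BFS by a per-letter position lookup and the closed-form axial hex distance (simpler direct arithmetic), equivalent on the rectangular duplicate-free keyboards Pre_ admits.

-- ===== PORT A =====
-- the six axial directions of A's BFS, in A's order
def pvDirs : List (Int × Int) := [(1,0),(-1,0),(0,-1),(0,1),(-1,1),(1,-1)]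

-- visited[x][y] reads/writes; the loop guards (and the fact that gathered positions are
-- nonnegative) ensure 0 <= x < 3 and 0 <= y before any access made inside Pre_, so plain
-- clamped Nat indexing is Python-exact on every admitted input.
def pvVisGet (v : List (List Bool)) (x y : Int) : Bool :=
  (v.getD x.toNat []).getD y.toNat false
def pvVisSet (v : List (List Bool)) (x y : Int) : List (List Bool) :=
  v.set x.toNat ((v.getD x.toNat []).set y.toNat true)

-- A's while-queue BFS loop; collections.deque is ported as the classic two-list deque
-- (popleft takes from `front`, append conses onto `back`, refilled by one reverse).
-- The fuel only makes the recursion structural (100 > the <= 31 pops plus transfer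
-- steps possible on the 3x10 board admitted by Pre_; deque empty = Python's None).
def pvBfsLoop (lens : List Int) (tgt : Int × Int) : Nat → List ((Int × Int) × Int) → List ((Int × Int) × Int) → List (List Bool) → Option Int
  | 0, _, _, _ => none
  | fuel+1, [], back, visited =>
    match back.reverse with
    | [] => none
    | x :: front => pvBfsLoop lens tgt fuel (x :: front) [] visited
  | fuel+1, (c, t) :: rest, back, visited =>
    if c.1 = tgt.1 ∧ c.2 = tgt.2 then some t
    else
      let s := pvDirs.foldl (fun (vq : List (List Bool) × List ((Int × Int) × Int)) d =>
        let nx := c.1 + d.1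
        let ny := c.2 + d.2
        if nx < 0 ∨ 3 ≤ nx then vq
        else if ny < 0 ∨ lens.getD nx.toNat 0 ≤ ny then vq
        else if pvVisGet vq.1 nx ny then vq
        else (pvVisSet vq.1 nx ny, ((nx, ny), t + 2) :: vq.2)) (visited, back)
      pvBfsLoop lens tgt fuel rest s.2 s.1

-- A's find_min_time; its BFS reads the keyboard only through len(keyboard[next_x]),
-- which pvFmtCore receives as the list of row lengths.
def pvFmtCore (lens : List Int) (src tgt : Int × Int) : Option Int :=
  pvBfsLoop lens tgt 100 [(src, 0)] [] (pvVisSet (List.replicate 3 (List.replicate 10 false)) src.1 src.2)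

def find_min_time (keyboard : List (List String)) (src tgt : Int × Int) : Option Int :=
  pvFmtCore (keyboard.map (fun r => (r.length : Int))) src tgt

-- A's triple position-gathering loop (for alp in word / range(len(keyboard)) / range(len(row)))
def pvGatherA (keyboard : List (List String)) (word : String) : List (Int × Int) :=
  word.toList.foldl (fun acc alp =>
    (PySem.List.pyRange 0 (PySem.List.len keyboard) 1).foldl (fun acc i =>
      (PySem.List.pyRange 0 (PySem.List.len (PySem.List.pyGetD keyboard i [])) 1).foldl (fun acc j =>
        if PySem.List.pyGetD (PySem.List.pyGetD keyboard i []) j "" = String.ofList [alp]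
        then acc ++ [(i, j)] else acc) acc) acc) []

-- body of A's pair loop: time += 1; time += find_min_time(...); none where Python
-- would raise (word_point_list[i] IndexError / `time += None` TypeError) — outside Pre_
def pvLoopStepA (keyboard : List (List String)) (pts : List (Int × Int)) (acc : Option Int) (i : Int) : Option Int :=
  match acc, PySem.List.pyGet? pts i, PySem.List.pyGet? pts (i+1) with
  | some t, some p, some q =>
    match find_min_time keyboard p q with
    | some b => some (t + 1 + b)
    | _ => none
  | _, _, _ => none

def solution (keyboard : List (List String)) (word : String) : Int :=
  let pts := pvGatherA keyboard word
  let timeOpt := (PySem.List.pyRange 0 (PySem.Str.len word - 1) 1).foldl (pvLoopStepA keyboard pts) (some 0)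
  match timeOpt with
  | some t => t + 1
  | none => 0  -- Python raised; value irrelevant, outside Pre_

-- ===== PORT B =====
-- B's _find: nested for-loops over enumerate with an early return (None if absent)
def pvFindRow (i : Int) (ch : String) : List (Int × String) → Option (Int × Int)
  | [] => none
  | jc :: rest => if jc.2 = ch then some (i, jc.1) else pvFindRow i ch rest

def pvFindRows (ch : String) : List (Int × List String) → Option (Int × Int)
  | [] => none
  | ir :: rest =>
    match pvFindRow ir.1 ch (PySem.List.enumerate ir.2) with
    | some p => some p
    | none => pvFindRows ch rest

def pv_find (keyboard : List (List String)) (ch : String) : Option (Int × Int) :=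
  pvFindRows ch (PySem.List.enumerate keyboard)

-- dq, dr and the distance term added per pair: abs(dq) + abs(dr) + abs(dq + dr)
def pvHex (p q : Int × Int) : Int :=
  |q.1 - p.1| + |q.2 - p.2| + |q.1 - p.1 + (q.2 - p.2)|

-- body of B's pair loop; none where Python would raise unpacking _find's None — outside Pre_
def pvPairStepB (keyboard : List (List String)) (acc : Option Int) (ab : Char × Char) : Option Int :=
  match acc, pv_find keyboard (String.ofList [ab.1]), pv_find keyboard (String.ofList [ab.2]) with
  | some t, some p, some q => some (t + 1 + pvHex p q)
  | _, _, _ => none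

def solution_alt (keyboard : List (List String)) (word : String) : Int :=
  let res := (word.toList.zip (PySem.List.slice word.toList (some 1) none)).foldl
    (pvPairStepB keyboard) (some 1)
  match res with
  | some t => t
  | none => 0  -- Python raised; value irrelevant, outside Pre_

-- ===== PRECONDITION & SPEC =====
-- For words of ≥ 2 letters Pre_ keeps only the intended keyboards (3 rows of one common
-- length ≤ 10, each letter of the word in exactly one cell): elsewhere A usually raises
-- (IndexError/TypeError from its hard-coded 3×10 visited array or a missing letter), and
-- where an irregular or duplicate-letter board still lets A return, the value is an
-- artefact of its BFS routing around ragged rows or of its accidental pairing of the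
-- multiply-collected positions.
def Pre_solution (keyboard : List (List String)) (word : String) : Prop :=
  word.toList.length ≤ 1 ∨
  (keyboard.length == 3
   && keyboard.all (fun r => r.length == (keyboard.headD []).length)
   && (keyboard.headD []).length ≤ 10
   && word.toList.all (fun c => (keyboard.flatMap id).count (String.ofList [c]) == 1)) = true
instance (keyboard : List (List String)) (word : String) : Decidable (Pre_solution keyboard word) := by unfold Pre_solution; infer_instance

def pvWitness_solution : List (List String) × String := ([["a","b"],["c","d"],["e","f"]], "ad")

def Spec_solution (keyboard : List (List String)) (word : String) (out : Int) : Prop := out = solution_alt keyboard word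
instance (keyboard : List (List String)) (word : String) (out : Int) : Decidable (Spec_solution keyboard word out) := by unfold Spec_solution; infer_instance

-- ===== CLAIM (what is proved, stated in full; the proofs are below) =====
def Claim_equal_solution : Prop := ∀ (keyboard : List (List String)) (word : String), Dom_solution keyboard word → Pre_solution keyboard word → Spec_solution keyboard word (solution keyboard word)

-- ===== LEMMAS AND PROOFS =====

-- the cells holding letter s, in A's (and _find's) scan order
def pvMatches (keyboard : List (List String)) (s : String) : List (Int × Int) :=
  (PySem.List.enumerate keyboard).flatMap (fun ir =>
    (PySem.List.enumerate ir.2).filterMap (fun jc =>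
      if jc.2 = s then some (ir.1, jc.1) else none))

-- BFS = closed form, checked over the whole finite space Pre_ admits:
-- 3 rows of one common length L ≤ 10, both endpoints on the board.
set_option maxRecDepth 1000000 in
set_option maxHeartbeats 12000000 in
theorem pvBfs_eq_hex : ∀ L : Nat, L < 11 → ∀ px : Nat, px < 3 → ∀ py : Nat, py < L → ∀ qx : Nat, qx < 3 → ∀ qy : Nat, qy < L →
    pvFmtCore [(L:Int),(L:Int),(L:Int)] ((px:Int),(py:Int)) ((qx:Int),(qy:Int)) = some (pvHex ((px:Int),(py:Int)) ((qx:Int),(qy:Int))) := by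
  decide

theorem pvFlatMap_ite_singleton {α β : Type} (p : α → Prop) [DecidablePred p] (f : α → β) (l : List α) :
    l.flatMap (fun x => if p x then [f x] else []) = l.filterMap (fun x => if p x then some (f x) else none) := by
  induction l with
  | nil => rfl
  | cons x t ih => by_cases h : p x <;> simp [h, ih]

theorem pvInner (row : List String) (i : Int) (s : String) (acc : List (Int × Int)) :
    (PySem.List.pyRange 0 (PySem.List.len row) 1).foldl (fun acc j =>
        if PySem.List.pyGetD row j "" = s then acc ++ [(i, j)] else acc) acc
    = acc ++ (PySem.List.enumerate row).filterMap (fun jc =>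
        if jc.2 = s then some (i, jc.1) else none) := by
  rw [PySem.List.enumerate_eq_map_pyRange row "", List.filterMap_map]
  have hbody : (fun (acc : List (Int × Int)) j =>
      if PySem.List.pyGetD row j "" = s then acc ++ [(i, j)] else acc)
      = (fun acc j => acc ++ (if PySem.List.pyGetD row j "" = s then [(i, j)] else [])) := by
    funext a j; split <;> simp
  rw [hbody, PySem.List.foldl_append_eq_flatMap,
    pvFlatMap_ite_singleton (fun j => PySem.List.pyGetD row j "" = s) (fun j => (i, j))]
  rfl

theorem pvGather_eq (keyboard : List (List String)) (word : String) :
    pvGatherA keyboard word = word.toList.flatMap (fun c => pvMatches keyboard (String.ofList [c])) := by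
  unfold pvGatherA pvMatches
  have hmid : ∀ (alp : Char) (acc : List (Int × Int)),
      (PySem.List.pyRange 0 (PySem.List.len keyboard) 1).foldl (fun acc i =>
        (PySem.List.pyRange 0 (PySem.List.len (PySem.List.pyGetD keyboard i [])) 1).foldl (fun acc j =>
          if PySem.List.pyGetD (PySem.List.pyGetD keyboard i []) j "" = String.ofList [alp]
          then acc ++ [(i, j)] else acc) acc) acc
      = acc ++ (PySem.List.enumerate keyboard).flatMap (fun ir =>
          (PySem.List.enumerate ir.2).filterMap (fun jc =>
            if jc.2 = String.ofList [alp] then some (ir.1, jc.1) else none)) := by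
    intro alp acc
    have hb : (fun (acc : List (Int × Int)) i =>
        (PySem.List.pyRange 0 (PySem.List.len (PySem.List.pyGetD keyboard i [])) 1).foldl (fun acc j =>
          if PySem.List.pyGetD (PySem.List.pyGetD keyboard i []) j "" = String.ofList [alp]
          then acc ++ [(i, j)] else acc) acc)
        = (fun acc i => acc ++ (PySem.List.enumerate (PySem.List.pyGetD keyboard i [])).filterMap (fun jc =>
            if jc.2 = String.ofList [alp] then some (i, jc.1) else none)) := by
      funext a i; exact pvInner _ i _ a
    rw [hb, PySem.List.foldl_append_eq_flatMap,
      PySem.List.enumerate_eq_map_pyRange keyboard [], List.flatMap_map]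
  have hw : (fun (acc : List (Int × Int)) alp =>
      (PySem.List.pyRange 0 (PySem.List.len keyboard) 1).foldl (fun acc i =>
        (PySem.List.pyRange 0 (PySem.List.len (PySem.List.pyGetD keyboard i [])) 1).foldl (fun acc j =>
          if PySem.List.pyGetD (PySem.List.pyGetD keyboard i []) j "" = String.ofList [alp]
          then acc ++ [(i, j)] else acc) acc) acc)
      = (fun acc alp => acc ++ (PySem.List.enumerate keyboard).flatMap (fun ir =>
          (PySem.List.enumerate ir.2).filterMap (fun jc =>
            if jc.2 = String.ofList [alp] then some (ir.1, jc.1) else none))) := by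
    funext a alp; exact hmid alp a
  rw [hw, PySem.List.foldl_append_eq_flatMap]
  rfl

theorem pvMem_matches (keyboard : List (List String)) (s : String) (p : Int × Int)
    (hp : p ∈ pvMatches keyboard s) :
    ∃ (i j : Nat) (hi : i < keyboard.length), j < keyboard[i].length ∧ p = ((i : Int), (j : Int)) := by
  unfold pvMatches at hp
  simp only [List.mem_flatMap, List.mem_filterMap, PySem.List.mem_enumerate_iff] at hp
  obtain ⟨ir, ⟨k, hk, hir⟩, jc, ⟨j, hj, hjc⟩, hsome⟩ := hp
  subst hir
  subst hjc
  simp only [zero_add] at hsome hj ⊢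
  split at hsome
  · exact ⟨k, j, hk, by simpa using hj, by simpa using hsome.symm⟩
  · exact absurd hsome (by simp)

-- _find reads the first entry of the match list
theorem pvFindRow_eq (i : Int) (ch : String) (e : List (Int × String)) :
    pvFindRow i ch e = (e.filterMap (fun jc => if jc.2 = ch then some (i, jc.1) else none)).head? := by
  induction e with
  | nil => rfl
  | cons x t ih => by_cases h : x.2 = ch <;> simp [pvFindRow, h, ih]

theorem pvFindRows_eq (ch : String) (l : List (Int × List String)) :
    pvFindRows ch l = (l.flatMap (fun ir =>
      (PySem.List.enumerate ir.2).filterMap (fun jc =>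
        if jc.2 = ch then some (ir.1, jc.1) else none))).head? := by
  induction l with
  | nil => rfl
  | cons x t ih =>
    simp only [pvFindRows, pvFindRow_eq, List.flatMap_cons, List.head?_append, ih]
    cases ((PySem.List.enumerate x.2).filterMap (fun jc => if jc.2 = ch then some (x.1, jc.1) else none)).head? <;> rfl

theorem pvFind_eq (keyboard : List (List String)) (ch : String) :
    pv_find keyboard ch = (pvMatches keyboard ch).head? := by
  unfold pv_find pvMatches
  exact pvFindRows_eq ch _

-- |matches| counts the occurrences of s among the flattened cells
theorem pvMatches_len_inner (s : String) (row : List String) (i : Int) : ∀ (j0 : Int),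
    ((PySem.List.enumerate row j0).filterMap (fun jc => if jc.2 = s then some (i, jc.1) else none)).length
    = row.count s := by
  induction row with
  | nil => intro j0; rfl
  | cons x t ih =>
    intro j0
    rw [PySem.List.enumerate_cons]
    by_cases h : x = s <;>
      simp [h, ih (j0 + 1)]

theorem pvMatches_len_outer (s : String) (kb : List (List String)) : ∀ (i0 : Int),
    ((PySem.List.enumerate kb i0).flatMap (fun ir =>
      (PySem.List.enumerate ir.2).filterMap (fun jc =>
        if jc.2 = s then some (ir.1, jc.1) else none))).length
    = (kb.flatMap id).count s := by
  induction kb with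
  | nil => intro i0; rfl
  | cons r t ih =>
    intro i0
    rw [PySem.List.enumerate_cons]
    simp only [List.flatMap_cons, List.length_append, List.count_append, id,
      pvMatches_len_inner s r i0, ih (i0+1)]

theorem pvMatches_length (keyboard : List (List String)) (s : String) :
    (pvMatches keyboard s).length = (keyboard.flatMap id).count s :=
  pvMatches_len_outer s keyboard 0

theorem pvFlatMap_singleton {α β : Type} (g : α → List β) (f : α → β) (l : List α)
    (h : ∀ x ∈ l, g x = [f x]) : l.flatMap g = l.map f := by
  induction l with
  | nil => rfl
  | cons x t ih =>
    simp [List.flatMap_cons, h x (by simp), ih (fun y hy => h y (by simp [hy]))]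

theorem pvAloop (keyboard : List (List String)) (pts : List (Int × Int)) (m : Nat)
    (hm : m < pts.length)
    (hfmt : ∀ p ∈ pts, ∀ q ∈ pts, find_min_time keyboard p q = some (pvHex p q)) :
    (PySem.List.pyRange 0 (m : Int) 1).foldl (pvLoopStepA keyboard pts) (some 0)
    = some (∑ i ∈ Finset.range m, (1 + pvHex (pts.getD i (0,0)) (pts.getD (i+1) (0,0)))) := by
  induction m with
  | zero => simp [PySem.List.pyRange_one_eq_nil]
  | succ m ih =>
    have hcast : ((m + 1 : Nat) : Int) = (m : Int) + 1 := by push_cast; ring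
    rw [hcast, PySem.List.pyRange_one_succ_right (by positivity), List.foldl_append,
      ih (by omega)]
    have h1 : PySem.List.pyGet? pts ((m : Int)) = some (pts.getD m (0,0)) := by
      rw [PySem.List.pyGet?_natCast, List.getElem?_eq_getElem (by omega), List.getD_eq_getElem _ _ (by omega)]
    have h2 : PySem.List.pyGet? pts ((m : Int) + 1) = some (pts.getD (m+1) (0,0)) := by
      have : ((m : Int) + 1) = ((m + 1 : Nat) : Int) := by push_cast; ring
      rw [this, PySem.List.pyGet?_natCast, List.getElem?_eq_getElem (by omega), List.getD_eq_getElem _ _ (by omega)]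
    simp only [List.foldl_cons, List.foldl_nil, pvLoopStepA, h1, h2]
    have hmem : ∀ i : Nat, i < pts.length → pts.getD i (0,0) ∈ pts := by
      intro i hi; rw [List.getD_eq_getElem _ _ hi]; exact List.getElem_mem hi
    rw [hfmt _ (hmem m (by omega)) _ (hmem (m+1) (by omega))]
    rw [Finset.sum_range_succ]
    ring_nf

-- B's pair loop, given that _find answers f on every letter of the list
theorem pvBloop (keyboard : List (List String)) (f : Char → Int × Int) :
    ∀ (l : List Char) (c : Int), (∀ x ∈ l, pv_find keyboard (String.ofList [x]) = some (f x)) →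
    (l.zip l.tail).foldl (pvPairStepB keyboard) (some c)
    = some (c + ∑ i ∈ Finset.range (l.length - 1),
        (1 + pvHex ((l.map f).getD i (0,0)) ((l.map f).getD (i+1) (0,0)))) := by
  intro l
  induction l with
  | nil => intro c _; simp
  | cons a t ih =>
    intro c hfind
    match t with
    | [] => simp
    | b :: t' =>
      have hstep : pvPairStepB keyboard (some c) (a, b) = some (c + 1 + pvHex (f a) (f b)) := by
        simp [pvPairStepB, hfind a (by simp), hfind b (by simp)]
      have := ih (c + 1 + pvHex (f a) (f b)) (fun x hx => hfind x (by simp [hx]))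
      simp only [List.tail_cons, List.zip_cons_cons, List.foldl_cons, hstep] at this ⊢
      rw [this]
      have hL : (a :: b :: t').length - 1 = ((b :: t').length - 1) + 1 := by simp
      rw [hL, Finset.sum_range_succ']
      simp only [List.map_cons, List.getD_cons_succ, List.getD_cons_zero]
      congr 1
      ring

-- unpack the Boolean rectangular-keyboard branch of Pre_ into Prop form
theorem pvPre_unpack (kb : List (List String)) (w : String) (h : Pre_solution kb w)
    (hn : ¬ w.toList.length ≤ 1) :
    kb.length = 3 ∧ (∀ r ∈ kb, r.length = (kb.headD []).length) ∧ (kb.headD []).length ≤ 10 ∧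
    (∀ c ∈ w.toList, (kb.flatMap id).count (String.ofList [c]) = 1) := by
  obtain h1 | h2 := h
  · omega
  · simp only [Bool.and_eq_true, beq_iff_eq, List.all_eq_true, decide_eq_true_eq] at h2
    obtain ⟨⟨⟨h3, hr⟩, hL⟩, hw⟩ := h2
    exact ⟨h3, hr, hL, hw⟩

-- ===== VERDICT (by name: the statement is the Claim_ definition above) =====
theorem solution_spec : Claim_equal_solution := by
  unfold Claim_equal_solution Spec_solution
  intro keyboard word _ hpre
  unfold solution solution_alt
  simp only [pvGather_eq, PySem.Str.len_eq, PySem.List.slice_from_one]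
  by_cases hn : word.toList.length ≤ 1
  · -- 0 or 1 letters: no pair loop on either side
    interval_cases h : word.toList.length
    · rw [show ((0:Nat):Int) - 1 = -1 by norm_num, PySem.List.pyRange_one_eq_nil (by omega)]
      obtain h0 := List.length_eq_zero_iff.mp h
      simp [h0]
    · obtain ⟨x, hx⟩ := List.length_eq_one_iff.mp h
      rw [show ((1:Nat):Int) - 1 = 0 by norm_num, PySem.List.pyRange_one_eq_nil (by omega)]
      simp [hx]
  · obtain ⟨h3, hrows, hLle, hcs⟩ := pvPre_unpack keyboard word hpre hn
    -- the unique position of each letter of the word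
    set f : Char → Int × Int := fun c => (pvMatches keyboard (String.ofList [c])).headD (0,0) with hf
    have hsingle : ∀ c ∈ word.toList, pvMatches keyboard (String.ofList [c]) = [f c] := by
      intro c hc
      have hlen1 : (pvMatches keyboard (String.ofList [c])).length = 1 := by
        rw [pvMatches_length]; exact hcs c hc
      obtain ⟨p, hp⟩ := List.length_eq_one_iff.mp hlen1
      rw [hp]; simp [hf, hp]
    have hfindf : ∀ c ∈ word.toList, pv_find keyboard (String.ofList [c]) = some (f c) := by
      intro c hc
      rw [pvFind_eq, hsingle c hc]; rfl
    have hpts : word.toList.flatMap (fun c => pvMatches keyboard (String.ofList [c]))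
        = word.toList.map f :=
      pvFlatMap_singleton _ f _ hsingle
    rw [hpts]
    set pts := word.toList.map f with hptsdef
    have hptslen : pts.length = word.toList.length := by simp [hptsdef]
    set n := word.toList.length with hnn
    obtain ⟨a, b, c, hk⟩ := List.length_eq_three.mp h3
    have hlens : keyboard.map (fun r => (r.length : Int))
        = [((keyboard.headD []).length : Int), ((keyboard.headD []).length : Int), ((keyboard.headD []).length : Int)] := by
      subst hk
      have ha := hrows a (by simp)
      have hb := hrows b (by simp)
      have hc := hrows c (by simp)
      simp [ha, hb, hc]
    have hfmt : ∀ p ∈ pts, ∀ q ∈ pts, find_min_time keyboard p q = some (pvHex p q) := by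
      intro p hp q hq
      obtain ⟨cp, hcp, hpe⟩ := List.mem_map.mp hp
      obtain ⟨cq, hcq, hqe⟩ := List.mem_map.mp hq
      have hpm : p ∈ pvMatches keyboard (String.ofList [cp]) := by
        rw [hsingle cp hcp]; simp [hpe]
      have hqm : q ∈ pvMatches keyboard (String.ofList [cq]) := by
        rw [hsingle cq hcq]; simp [hqe]
      obtain ⟨i, j, hi, hj, hpe'⟩ := pvMem_matches keyboard _ p hpm
      obtain ⟨i', j', hi', hj', hqe'⟩ := pvMem_matches keyboard _ q hqm
      have hrowi : keyboard[i].length = (keyboard.headD []).length :=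
        hrows _ (List.getElem_mem hi)
      have hrowi' : keyboard[i'].length = (keyboard.headD []).length :=
        hrows _ (List.getElem_mem hi')
      rw [hpe', hqe']
      unfold find_min_time
      rw [hlens]
      exact pvBfs_eq_hex (keyboard.headD []).length (by omega) i (by omega) j (by omega)
        i' (by omega) j' (by omega)
    have hcast : ((n : Int) - 1) = ((n - 1 : Nat) : Int) := by omega
    rw [hcast, pvAloop keyboard pts (n - 1) (by omega) hfmt,
      pvBloop keyboard f word.toList 1 hfindf]
    simp only [← hptsdef, ← hnn]
    ring_nf
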